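-- pv_equiv track=rewrite | github.com/pypi-data/pypi-mirror-390 | packages/pysvgchart/pysvgchart-0.6.2.tar.gz/pysvgchart-0.6.2/pysvgchart/charts.py | generate_series_names
-- ===== SOURCE A (Python) =====
-- from itertools import zip_longest, cycle
--
-- def generate_series_names(
--         prefix: str,
--         n: int,
--         names: list[str] | tuple[str, ...] | None,
-- ) -> list[str]:
--     """
--     generate missing names for series
--     """
--     return [
--                real if real is not None else generated
--                for real, generated in zip_longest(
--             names if names is not None else [],
--             [f"{prefix} {k}" for k in range(1, n + 1)],
--         )
--            ][:n]
-- ===== SOURCE B (Python) =====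
-- def generate_series_names(prefix, n, names):
--     # keep the provided names (sliced to n), then extend with generated defaults
--     result = list(names)[:n] if names is not None else ([][:n])
--     result.extend(f"{prefix} {k}" for k in range(len(result) + 1, n + 1))
--     return result
-- ===== Notes on version B (the rewrite author's own statement) =====
-- stated objective: faster
-- what changed: Replaces the zip_longest-pair-then-pick comprehension plus trailing slice by two direct passes: slice the provided names to n, then extend with generated default names only for the remaining indices, so the formatted strings that real names would overwrite are never built.
import Mathlib
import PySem

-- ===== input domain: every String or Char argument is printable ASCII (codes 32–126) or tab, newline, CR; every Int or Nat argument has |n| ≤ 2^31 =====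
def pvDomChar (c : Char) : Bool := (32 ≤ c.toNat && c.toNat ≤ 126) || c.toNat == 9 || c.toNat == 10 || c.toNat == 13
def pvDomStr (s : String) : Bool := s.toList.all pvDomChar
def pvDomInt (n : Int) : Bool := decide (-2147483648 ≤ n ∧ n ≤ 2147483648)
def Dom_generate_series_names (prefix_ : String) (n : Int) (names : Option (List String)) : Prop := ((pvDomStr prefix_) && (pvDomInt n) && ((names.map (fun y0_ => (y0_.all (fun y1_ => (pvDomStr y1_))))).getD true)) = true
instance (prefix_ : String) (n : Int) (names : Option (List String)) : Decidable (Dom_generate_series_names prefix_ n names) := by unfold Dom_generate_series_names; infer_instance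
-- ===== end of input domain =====

-- ===== PORT A =====
-- B changes the decomposition: A zips names with all n generated names and picks per pair, B slices then extends.
-- zip_longest(xs, ys) with fill value None, for two string lists (elements are strings; the typed
-- domain has no None inside the list, so each pair has at least one `some`).
def pyZipLongest (xs ys : List String) : List (Option String × Option String) :=
  match xs, ys with
  | [], [] => []
  | x :: xs', [] => (some x, none) :: pyZipLongest xs' []
  | [], y :: ys' => (none, some y) :: pyZipLongest [] ys'
  | x :: xs', y :: ys' => (some x, some y) :: pyZipLongest xs' ys'

def generate_series_names (prefix_ : String) (n : Int) (names : Option (List String)) : List String :=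
  let generated := (PySem.List.pyRange 1 (n + 1) 1).map (fun k => prefix_ ++ " " ++ PySem.Int.toStr k)
  let picked := (pyZipLongest (names.getD []) generated).map (fun p =>
    match p.1 with
    | some real => real          -- real if real is not None
    | none => p.2.getD ""        -- else generated; (none, none) is unreachable in zip_longest output
  )
  PySem.List.slice picked none (some n)   -- [:n]

-- ===== PORT B =====
def generate_series_names_alt (prefix_ : String) (n : Int) (names : Option (List String)) : List String :=
  let result := PySem.List.slice (names.getD []) none (some n)
  result ++ (PySem.List.pyRange ((result.length : Int) + 1) (n + 1) 1).map
      (fun k => prefix_ ++ " " ++ PySem.Int.toStr k)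

-- ===== PRECONDITION & SPEC =====
def Spec_generate_series_names (prefix_ : String) (n : Int) (names : Option (List String)) (out : List String) : Prop := out = generate_series_names_alt prefix_ n names
instance (prefix_ : String) (n : Int) (names : Option (List String)) (out : List String) : Decidable (Spec_generate_series_names prefix_ n names out) := by unfold Spec_generate_series_names; infer_instance

-- ===== CLAIM (what is proved, stated in full; the proofs are below) =====
def Claim_equal_generate_series_names : Prop := ∀ (prefix_ : String) (n : Int) (names : Option (List String)), Dom_generate_series_names prefix_ n names → Spec_generate_series_names prefix_ n names (generate_series_names prefix_ n names)

-- ===== LEMMAS AND PROOFS =====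

lemma map_pick_pyZipLongest (xs ys : List String) :
    (pyZipLongest xs ys).map (fun p : Option String × Option String =>
      match p.1 with | some real => real | none => p.2.getD "") = xs ++ ys.drop xs.length := by
  induction xs generalizing ys with
  | nil =>
    induction ys with
    | nil => simp [pyZipLongest]
    | cons y ys ih => simp [pyZipLongest] at ih ⊢; exact ih
  | cons x xs ih =>
    cases ys with
    | nil => simpa [pyZipLongest] using ih []
    | cons y ys => simpa [pyZipLongest] using ih ys

-- ===== VERDICT (by name: the statement is the Claim_ definition above) =====
theorem generate_series_names_spec : Claim_equal_generate_series_names := by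
  intro prefix_ n names _
  unfold Spec_generate_series_names generate_series_names generate_series_names_alt
  simp only [map_pick_pyZipLongest]
  set xs := names.getD [] with hxs
  set gen := fun k : Int => prefix_ ++ " " ++ PySem.Int.toStr k with hgen
  by_cases hn : n < 0
  · -- n < 0: both generated ranges are empty; both sides reduce to the negative slice of xs
    rw [PySem.List.pyRange_one_eq_nil (by omega : n + 1 ≤ 1),
        PySem.List.pyRange_one_eq_nil (by omega : n + 1 ≤ ((PySem.List.slice xs none (some n)).length : Int) + 1)]
    simp
  · -- 0 ≤ n: slice [:n] is take n.toNat
    push Not at hn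
    rw [PySem.List.slice_to _ hn, PySem.List.slice_to _ hn]
    by_cases hlen : n.toNat ≤ xs.length
    · -- enough real names: the appended generated range is empty on both sides
      rw [List.take_append_of_le_length (by simpa using hlen),
          List.length_take_of_le hlen,
          PySem.List.pyRange_one_eq_nil (by omega : n + 1 ≤ (n.toNat : Int) + 1)]
      simp
    · -- fewer real names than n: xs survives whole, the tail comes from the generated range
      push Not at hlen
      rw [List.take_of_length_le (by omega : xs.length ≤ n.toNat),
          List.take_append, List.take_of_length_le (by omega : xs.length ≤ n.toNat)]
      have hsplit : PySem.List.pyRange 1 (n + 1) 1 =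
          PySem.List.pyRange 1 (1 + (xs.length : Int)) 1 ++ PySem.List.pyRange (1 + (xs.length : Int)) (n + 1) 1 :=
        PySem.List.pyRange_one_append 1 (1 + (xs.length : Int)) (n + 1) (by omega) (by omega)
      have hlen1 : (PySem.List.pyRange 1 (1 + (xs.length : Int)) 1).length = xs.length := by
        rw [PySem.List.length_pyRange_one]; omega
      have hlen2 : (PySem.List.pyRange (1 + (xs.length : Int)) (n + 1) 1).length = n.toNat - xs.length := by
        rw [PySem.List.length_pyRange_one]; omega
      rw [hsplit, List.map_append, List.drop_append,
          List.drop_eq_nil_of_le (by simp [hlen1]),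
          List.take_of_length_le (by simp [hlen2])]
      simp [hlen1]
      rw [show (1 + (xs.length : Int)) = ((xs.length : Int) + 1) from by ring]
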